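-- pv_equiv track=rewrite | github.com/saadsheralam/Authorship-Attribution | 24100161_Phase1.py | get_bag_of_words
-- ===== SOURCE A (Python) =====
-- def get_bag_of_words(tweet, vocabulary):
--     bag_of_words = {}
--     for word in vocabulary:
--         bag_of_words[word] = 0
--
--     tweet_words = tweet.split()
--     for word in tweet_words:
--         if word in bag_of_words.keys():
--             bag_of_words[word] += 1
--
--     # Laplace smoothing
--     # Add 1 to count of training vocabulary
--     # alpha = 1
--     for key in bag_of_words.keys():
--         bag_of_words[key] += 1
--
--     return bag_of_words
-- ===== SOURCE B (Python) =====
-- def get_bag_of_words(tweet, vocabulary):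
--     words = tweet.split()
--     return {w: 1 + words.count(w) for w in vocabulary}
-- ===== Notes on version B (the rewrite author's own statement) =====
-- stated objective: alternative
-- what changed: A maintains a hash dict: it seeds zeros from the vocabulary, probes and bumps it while scanning the tweet, then adds the Laplace +1 in a third loop; B keeps no counting index at all: it splits once and, for each vocabulary word, counts its occurrences by a direct scan of the word list (list.count), folding the +1 into the emitted entry.
import Mathlib
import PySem

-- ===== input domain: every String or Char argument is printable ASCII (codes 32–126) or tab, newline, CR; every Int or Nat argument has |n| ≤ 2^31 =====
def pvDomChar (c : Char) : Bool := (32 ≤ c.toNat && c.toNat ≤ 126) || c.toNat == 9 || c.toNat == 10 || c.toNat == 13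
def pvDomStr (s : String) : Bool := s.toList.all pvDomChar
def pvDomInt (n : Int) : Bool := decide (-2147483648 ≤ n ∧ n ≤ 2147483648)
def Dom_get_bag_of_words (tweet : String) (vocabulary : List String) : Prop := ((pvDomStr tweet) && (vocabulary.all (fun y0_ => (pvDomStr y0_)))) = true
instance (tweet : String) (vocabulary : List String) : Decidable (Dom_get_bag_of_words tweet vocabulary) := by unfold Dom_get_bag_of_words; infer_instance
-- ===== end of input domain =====

-- B drops A's hash-indexed counting (seed zeros, probe-and-bump while scanning the tweet,
-- a third Laplace +1 loop) and instead counts each vocabulary word by a direct scan of the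
-- split word list, folding the +1 into the emitted entry. Objective: alternative (not faster).

-- ===== PORT A =====
def get_bag_of_words (tweet : String) (vocabulary : List String) : List (String × Int) :=
  -- bag_of_words = {}; for word in vocabulary: bag_of_words[word] = 0
  let bag0 : PySem.Dict String Int :=
    vocabulary.foldl (fun d w => d.insert w 0) PySem.Dict.empty
  -- tweet_words = tweet.split(); for word in tweet_words: if word in bag: bag[word] += 1
  let bag1 : PySem.Dict String Int :=
    (PySem.Str.split₀ tweet).foldl
      (fun d w => if d.contains w then d.insert w (d.getD w 0 + 1) else d) bag0
  -- for key in bag.keys(): bag[key] += 1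
  let bag2 : PySem.Dict String Int :=
    bag1.keys.foldl (fun d k => d.insert k (d.getD k 0 + 1)) bag1
  bag2.items

-- ===== PORT B =====
def get_bag_of_words_alt (tweet : String) (vocabulary : List String) : List (String × Int) :=
  -- words = tweet.split()
  let words : List String := PySem.Str.split₀ tweet
  -- {w: 1 + words.count(w) for w in vocabulary}
  (vocabulary.foldl (fun d w => d.insert w (1 + (words.count w : Int)))
    (PySem.Dict.empty : PySem.Dict String Int)).items

-- ===== PRECONDITION & SPEC =====
def Spec_get_bag_of_words (tweet : String) (vocabulary : List String) (out : List (String × Int)) : Prop := out = get_bag_of_words_alt tweet vocabulary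
instance (tweet : String) (vocabulary : List String) (out : List (String × Int)) : Decidable (Spec_get_bag_of_words tweet vocabulary out) := by unfold Spec_get_bag_of_words; infer_instance

-- ===== CLAIM (what is proved, stated in full; the proofs are below) =====
def Claim_equal_get_bag_of_words : Prop := ∀ (tweet : String) (vocabulary : List String), Dom_get_bag_of_words tweet vocabulary → Spec_get_bag_of_words tweet vocabulary (get_bag_of_words tweet vocabulary)

-- ===== LEMMAS AND PROOFS =====

-- A fold of inserts whose value depends only on the key: lookup picks the value iff the key occurs.
theorem getD_foldl_insert_fun (l : List String) (f : String → Int)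
    (d : PySem.Dict String Int) (k : String) :
    (l.foldl (fun d w => d.insert w (f w)) d).getD k 0
      = if k ∈ l then f k else d.getD k 0 := by
  induction l generalizing d with
  | nil => simp
  | cons a l ih =>
    simp only [List.foldl_cons, ih, List.mem_cons, PySem.Dict.getD_insert]
    by_cases hl : k ∈ l <;> by_cases ha : k = a <;> simp [hl, ha]

-- The conditional-bump loop of A: keys are preserved.
theorem bump_loop_keys (l : List String) (d : PySem.Dict String Int) :
    (l.foldl (fun d w => if d.contains w then d.insert w (d.getD w 0 + 1) else d) d).keys
      = d.keys := by
  induction l generalizing d with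
  | nil => rfl
  | cons a l ih =>
    simp only [List.foldl_cons]
    by_cases h : d.contains a
    · rw [if_pos h, ih, PySem.Dict.keys_insert_of_contains _ _ h]
    · rw [if_neg h, ih]

theorem bump_loop_getD (l : List String) (d : PySem.Dict String Int) (k : String) :
    (l.foldl (fun d w => if d.contains w then d.insert w (d.getD w 0 + 1) else d) d).getD k 0
      = d.getD k 0 + (if d.contains k then (l.count k : Int) else 0) := by
  induction l generalizing d with
  | nil => simp
  | cons a l ih =>
    simp only [List.foldl_cons]
    by_cases h : d.contains a
    · rw [if_pos h, ih]
      have hc : ∀ j, (d.insert a (d.getD a 0 + 1)).contains j = (j == a || d.contains j) :=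
        fun j => PySem.Dict.contains_insert d a j _
      rw [hc k]
      by_cases hk : k = a
      · subst hk
        simp [PySem.Dict.getD_insert_self, h]
        ring
      · rw [PySem.Dict.getD_insert_of_ne _ _ _ (by exact hk)]
        have : (k == a) = false := by simp [hk]
        rw [this, Bool.false_or, List.count_cons]
        by_cases hck : d.contains k
        · simp [hck]
          exact fun h => hk h.symm
        · simp [hck]
    · rw [if_neg h, ih, List.count_cons]
      by_cases hk : k = a
      · subst hk; simp [h]
      · simp [Ne.symm hk]

-- The Laplace loop of A over a duplicate-free key list: every listed key gains one.
theorem laplace_loop_getD (l : List String) (hl : l.Nodup)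
    (d : PySem.Dict String Int) (k : String) :
    (l.foldl (fun d k => d.insert k (d.getD k 0 + 1)) d).getD k 0
      = if k ∈ l then d.getD k 0 + 1 else d.getD k 0 := by
  induction l generalizing d with
  | nil => simp
  | cons a l ih =>
    have hna : a ∉ l := (List.nodup_cons.mp hl).1
    simp only [List.foldl_cons, ih (List.nodup_cons.mp hl).2, List.mem_cons]
    by_cases hkl : k ∈ l
    · have hka : k ≠ a := fun h => hna (h ▸ hkl)
      rw [PySem.Dict.getD_insert_of_ne _ _ _ hka]
      simp [hkl]
    · by_cases hka : k = a
      · subst hka; simp [hkl, PySem.Dict.getD_insert_self]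
      · rw [PySem.Dict.getD_insert_of_ne _ _ _ hka]; simp [hkl, hka]

-- Keys of A's final dict: the Laplace loop runs over bag1.keys and only touches existing keys.
theorem laplace_loop_keys (l : List String) (d : PySem.Dict String Int)
    (hsub : ∀ x ∈ l, x ∈ d.keys) :
    (l.foldl (fun d k => d.insert k (d.getD k 0 + 1)) d).keys = d.keys := by
  induction l generalizing d with
  | nil => rfl
  | cons a l ih =>
    have ha : d.contains a := (PySem.Dict.contains_iff_mem_keys d a).mpr (hsub a (by simp))
    simp only [List.foldl_cons]
    rw [ih _ (fun x hx => by
        rw [PySem.Dict.keys_insert_of_contains _ _ ha]; exact hsub x (List.mem_cons_of_mem _ hx)),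
      PySem.Dict.keys_insert_of_contains _ _ ha]

-- keys of the zero-seed dict
theorem keys_bag0 (vocabulary : List String) :
    ((vocabulary.foldl (fun d w => d.insert w (0:Int)) PySem.Dict.empty)).keys
      = PySem.Set.ofList vocabulary := by
  rw [PySem.Dict.keys_foldl_insert]
  simp [PySem.Set.update_nil_left]

-- ===== VERDICT (by name: the statement is the Claim_ definition above) =====
theorem get_bag_of_words_spec : Claim_equal_get_bag_of_words := by
  intro tweet vocabulary _
  unfold Spec_get_bag_of_words get_bag_of_words get_bag_of_words_alt
  set tw := PySem.Str.split₀ tweet with htw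
  set bag0 : PySem.Dict String Int :=
    vocabulary.foldl (fun d w => d.insert w 0) PySem.Dict.empty with hbag0
  set bag1 : PySem.Dict String Int :=
    tw.foldl (fun d w => if d.contains w then d.insert w (d.getD w 0 + 1) else d) bag0 with hbag1
  set bagB : PySem.Dict String Int :=
    vocabulary.foldl (fun d w => d.insert w (1 + (tw.count w : Int))) PySem.Dict.empty with hbagB
  have hk0 : bag0.keys = PySem.Set.ofList vocabulary := keys_bag0 vocabulary
  have hk1 : bag1.keys = PySem.Set.ofList vocabulary := by
    rw [hbag1, bump_loop_keys, hk0]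
  have hnd1 : bag1.keys.Nodup := by rw [hk1]; exact PySem.Set.nodup_ofList vocabulary
  have hk2 : (bag1.keys.foldl (fun d k => d.insert k (d.getD k 0 + 1)) bag1).keys
      = PySem.Set.ofList vocabulary := by
    rw [laplace_loop_keys _ _ (fun x hx => hx), hk1]
  have hkB : bagB.keys = PySem.Set.ofList vocabulary := by
    rw [hbagB, PySem.Dict.keys_foldl_insert]
    simp [PySem.Set.update_nil_left]
  have hc0 : ∀ k, bag0.contains k = decide (k ∈ vocabulary) := by
    intro k
    rw [PySem.Dict.contains_eq_decide_mem_keys, hk0]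
    simp [PySem.Set.mem_ofList]
  have hg0 : ∀ k, bag0.getD k 0 = 0 := by
    intro k
    rw [hbag0, getD_foldl_insert_fun vocabulary (fun _ => 0)]
    simp [PySem.Dict.getD_empty]
  have hvalA : ∀ k ∈ vocabulary,
      (bag1.keys.foldl (fun d kk => d.insert kk (d.getD kk 0 + 1)) bag1).getD k 0
        = tw.count k + 1 := by
    intro k hk
    rw [laplace_loop_getD _ hnd1, if_pos (by rw [hk1]; exact (PySem.Set.mem_ofList _ _).mpr hk)]
    rw [hbag1, bump_loop_getD, hg0, hc0 k]
    simp [hk]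
  have hvalB : ∀ k ∈ vocabulary, bagB.getD k 0 = 1 + (tw.count k : Int) := by
    intro k hk
    rw [hbagB, getD_foldl_insert_fun vocabulary (fun w => 1 + (tw.count w : Int)), if_pos hk]
  have hndB : bagB.keys.Nodup := by rw [hkB]; exact PySem.Set.nodup_ofList vocabulary
  have hnd2 : (bag1.keys.foldl (fun d k => d.insert k (d.getD k 0 + 1)) bag1).keys.Nodup := by
    rw [hk2]; exact PySem.Set.nodup_ofList vocabulary
  rw [PySem.Dict.items_eq_map_keys _ hnd2 0, PySem.Dict.items_eq_map_keys _ hndB 0, hk2, hkB]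
  apply List.map_congr_left
  intro k hk
  have hkv : k ∈ vocabulary := (PySem.Set.mem_ofList _ _).mp hk
  rw [hvalA k hkv, hvalB k hkv]
  ring_nf
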